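-- pv_equiv track=rewrite | github.com/jiji-svg/coding_test | level0/day7/make_list.py | solution
-- ===== SOURCE A (Python) =====
-- def solution(arr):
--     stk = []
--     for i in range(len(arr)):
--         if arr[i] not in stk:
--             stk.append(arr[i])
--         else:
--             if arr[i] == stk[-1]:
--                 stk.pop(-1)
--             else:
--                 stk.append(arr[i])
--     if stk == []:
--         stk = [-1]
--     return stk
-- ===== SOURCE B (Python) =====
-- def solution(arr):
--     # Divide and conquer: reduce each half independently, then cancel equal
--     # elements across the boundary. Correct because adjacent-equal-pair
--     # cancellation is confluent: the fully reduced word is unique.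
--     def reduce(seg):
--         n = len(seg)
--         if n <= 1:
--             return list(seg)
--         m = n // 2
--         u = reduce(seg[:m])
--         v = reduce(seg[m:])
--         i, j = len(u) - 1, 0
--         while i >= 0 and j < len(v) and u[i] == v[j]:
--             i -= 1
--             j += 1
--         return u[:i + 1] + v[j:]
--     r = reduce(arr)
--     return r if r else [-1]
-- ===== Notes on version B (the rewrite author's own statement) =====
-- stated objective: faster
-- what changed: Replaced A's single left-to-right stack loop with a per-element linear membership scan by a divide-and-conquer reduction: reduce each half recursively and cancel equal elements across the boundary (correct since adjacent-pair cancellation is confluent).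
import Mathlib
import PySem

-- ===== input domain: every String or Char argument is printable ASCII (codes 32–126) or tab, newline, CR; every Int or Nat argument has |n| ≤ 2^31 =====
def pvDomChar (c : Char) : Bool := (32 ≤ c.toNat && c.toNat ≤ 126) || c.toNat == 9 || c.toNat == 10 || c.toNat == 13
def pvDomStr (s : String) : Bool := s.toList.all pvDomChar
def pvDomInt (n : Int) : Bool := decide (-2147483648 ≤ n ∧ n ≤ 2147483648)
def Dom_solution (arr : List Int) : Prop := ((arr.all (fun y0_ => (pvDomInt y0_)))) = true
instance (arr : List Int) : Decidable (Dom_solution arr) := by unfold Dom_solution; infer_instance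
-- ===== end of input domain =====

-- B reduces the list by divide and conquer (reduce halves, cancel across the boundary)
-- instead of A's stack loop with a per-element membership scan; same return value.


-- ===== PORT A =====
-- A's loop body: membership test first, then compare with the top (stk[-1]).
-- stk[-1]/pop(-1) are only reached when arr[i] ∈ stk, so the stack is nonempty there;
-- getLast?/dropLast on the top-at-the-end representation are exact.
def solutionStepA (stk : List Int) (x : Int) : List Int :=
  if ¬ stk.contains x then stk ++ [x]
  else if stk.getLast? = some x then stk.dropLast
  else stk ++ [x]

def solution (arr : List Int) : List Int :=
  let stk := arr.foldl solutionStepA []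
  if stk = [] then [-1] else stk

-- ===== PORT B =====
-- B's boundary-cancel while loop: drop the last of u and the head of v while they match.
def mergeCancel : List Int → List Int → List Int
  | u, [] => u
  | u, y :: vt =>
    if u.getLast? = some y then mergeCancel u.dropLast vt
    else u ++ y :: vt

-- B's recursive `reduce` on a segment: halves, recurse, cancel at the boundary.
def reduceHalve : List Int → List Int
  | [] => []
  | [x] => [x]
  | a :: b :: t =>
    let l := a :: b :: t
    let m := l.length / 2
    mergeCancel (reduceHalve (l.take m)) (reduceHalve (l.drop m))
termination_by l => l.length
decreasing_by
  · simp; omega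
  · simp; omega

def solution_alt (arr : List Int) : List Int :=
  let r := reduceHalve arr
  if r = [] then [-1] else r

-- ===== PRECONDITION & SPEC =====
def Spec_solution (arr : List Int) (out : List Int) : Prop := out = solution_alt arr
instance (arr : List Int) (out : List Int) : Decidable (Spec_solution arr out) := by unfold Spec_solution; infer_instance

-- ===== CLAIM (what is proved, stated in full; the proofs are below) =====
def Claim_equal_solution : Prop := ∀ (arr : List Int), Dom_solution arr → Spec_solution arr (solution arr)

-- ===== LEMMAS AND PROOFS =====

-- The simple cancellation step (pop iff the top equals x), and the same step as a
-- right fold (front of the list is the "reading frontier").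
def step (s : List Int) (x : Int) : List Int :=
  if s.getLast? = some x then s.dropLast else s ++ [x]

def stepR (x : Int) (r : List Int) : List Int :=
  if r.head? = some x then r.tail else x :: r

def reduceR (l : List Int) : List Int := l.foldr stepR []

-- "Reduced": no two adjacent equal elements.
def Red (l : List Int) : Prop := l.IsChain (· ≠ ·)

theorem stepA_eq (s : List Int) (x : Int) : solutionStepA s x = step s x := by
  unfold solutionStepA step
  by_cases hm : x ∈ s
  · have hc : s.contains x = true := by simpa using hm
    rw [if_neg (not_not_intro hc)]
  · have hc : ¬ s.contains x = true := by simpa using hm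
    have ht : ¬ s.getLast? = some x := fun h => hm (List.mem_of_getLast? h)
    rw [if_pos hc, if_neg ht]

theorem red_step {s : List Int} (h : Red s) (x : Int) : Red (step s x) := by
  unfold step
  split_ifs with hl
  · exact List.IsChain.dropLast h
  · refine List.IsChain.append h (List.isChain_singleton x) ?_
    intro a ha b hb hab
    have hbx : b = x := by simpa [eq_comm] using hb
    rw [Option.mem_def] at ha
    exact hl (hbx ▸ hab ▸ ha)

theorem eq_dropLast_append {u : List Int} {y : Int} (hl : u.getLast? = some y) :
    u = u.dropLast ++ [y] :=
  (List.dropLast_append_getLast? y hl).symm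

theorem red_dropLast_getLast {u : List Int} {y : Int} (hu : Red u)
    (hl : u.getLast? = some y) : ¬ u.dropLast.getLast? = some y := by
  intro hc
  rw [eq_dropLast_append hl] at hu
  have := (List.isChain_append.mp hu).2.2
  exact this y hc y (by simp) rfl

theorem step_step {u : List Int} (h : Red u) (x : Int) : step (step u x) x = u := by
  unfold step
  by_cases hl : u.getLast? = some x
  · rw [if_pos hl, if_neg (red_dropLast_getLast h hl)]
    exact (eq_dropLast_append hl).symm
  · rw [if_neg hl, if_pos (by simp), List.dropLast_concat]

theorem foldl_step_K {u : List Int} (h : Red u) (x : Int) (r : List Int) :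
    List.foldl step (step u x) r = List.foldl step u (stepR x r) := by
  unfold stepR
  match r with
  | [] => simp
  | y :: r' =>
    by_cases hy : y = x
    · subst hy
      simp [List.foldl, step_step h]
    · simp [List.foldl, hy]

theorem foldl_step_reduceR : ∀ (l : List Int) (u : List Int), Red u →
    List.foldl step u l = List.foldl step u (reduceR l) := by
  intro l
  induction l with
  | nil => intro u _; rfl
  | cons x t ih =>
    intro u hu
    have h0 : List.foldl step u (x :: t) = List.foldl step (step u x) t := rfl
    rw [h0, ih _ (red_step hu x), foldl_step_K hu x,
      show reduceR (x :: t) = stepR x (reduceR t) from rfl]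

theorem foldl_step_red : ∀ (r u : List Int), Red (u ++ r) → List.foldl step u r = u ++ r := by
  intro r
  induction r with
  | nil => intro u _; simp
  | cons x t ih =>
    intro u h
    have hlast : ¬ u.getLast? = some x := by
      intro hc
      exact (List.isChain_append.mp h).2.2 x hc x (by simp) rfl
    have hs : step u x = u ++ [x] := by simp [step, hlast]
    calc List.foldl step u (x :: t) = List.foldl step (u ++ [x]) t := by simp [List.foldl, hs]
      _ = (u ++ [x]) ++ t := ih (u ++ [x]) (by simpa using h)
      _ = u ++ x :: t := by simp

theorem red_stepR {r : List Int} (h : Red r) (x : Int) : Red (stepR x r) := by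
  unfold stepR
  split_ifs with hh
  · exact List.IsChain.tail h
  · match r with
    | [] => exact List.isChain_singleton x
    | y :: t =>
      refine List.isChain_cons.mpr ⟨?_, h⟩
      intro z hz
      simp only [List.head?_cons, Option.mem_def, Option.some.injEq] at hz
      intro hxz
      exact hh (by simp [← hz, hxz])

theorem red_reduceR (l : List Int) : Red (reduceR l) := by
  induction l with
  | nil => exact List.isChain_nil
  | cons x t ih => exact red_stepR ih x

theorem red_foldr_stepR {v : List Int} (hv : Red v) (l : List Int) :
    Red (List.foldr stepR v l) := by
  induction l with
  | nil => exact hv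
  | cons a t ih => exact red_stepR ih a

theorem foldr_stepR_red : ∀ (u v : List Int), Red (u ++ v) → List.foldr stepR v u = u ++ v := by
  intro u
  induction u with
  | nil => intro v _; simp
  | cons b u' ih =>
    intro v h
    have h' : Red (u' ++ v) := by
      have := List.IsChain.tail (l := (b :: u') ++ v) h
      simpa using this
    have hrest : List.foldr stepR v u' = u' ++ v := ih v h'
    have hhead : ¬ (u' ++ v).head? = some b := by
      intro hc
      have hb := (List.isChain_cons.mp (by simpa using h)).1
      exact hb b hc rfl
    show stepR b (List.foldr stepR v u') = (b :: u') ++ v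
    rw [hrest]
    unfold stepR
    rw [if_neg hhead]
    simp

theorem stepR_stepR {w : List Int} (h : Red w) (x : Int) : stepR x (stepR x w) = w := by
  unfold stepR
  match w with
  | [] => simp
  | y :: t =>
    by_cases hy : y = x
    · subst hy
      match t with
      | [] => simp
      | z :: t' =>
        have hzy : ¬ z = y := by
          have := (List.isChain_cons.mp h).1
          exact fun hz => this z (by simp) hz.symm
        simp [hzy]
    · simp [hy]

theorem foldr_stepR_reduceR : ∀ (l v : List Int), Red v →
    List.foldr stepR v l = List.foldr stepR v (reduceR l) := by
  intro l
  induction l with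
  | nil => intro v _; rfl
  | cons x t ih =>
    intro v hv
    have h1 : List.foldr stepR v (x :: t) = stepR x (List.foldr stepR v t) := rfl
    rw [h1, ih v hv, show reduceR (x :: t) = stepR x (reduceR t) from rfl]
    match hmatch : reduceR t with
    | [] => rfl
    | y :: r' =>
      by_cases hy : y = x
      · subst hy
        have hredr' : Red (List.foldr stepR v r') := red_foldr_stepR hv r'
        have h2 : stepR y (y :: r') = r' := by simp [stepR]
        rw [h2]
        show stepR y (stepR y (List.foldr stepR v r')) = _
        rw [stepR_stepR hredr']
      · have h2 : stepR x (y :: r') = x :: y :: r' := by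
          unfold stepR
          rw [if_neg]
          simp only [List.head?_cons, Option.some.injEq]
          exact hy
        rw [h2]
        rfl

theorem mergeCancel_eq_foldr : ∀ (v u : List Int), Red u → Red v →
    mergeCancel u v = List.foldr stepR v u := by
  intro v
  induction v with
  | nil =>
    intro u hu _
    have h0 : List.foldr stepR [] u = u ++ [] := foldr_stepR_red u [] (by simpa using hu)
    simpa [mergeCancel] using h0.symm
  | cons y vt ih =>
    intro u hu hv
    by_cases hl : u.getLast? = some y
    · have hu' : u = u.dropLast ++ [y] := eq_dropLast_append hl
      have hdrop : Red u.dropLast := List.IsChain.dropLast hu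
      have hvt : Red vt := List.IsChain.tail hv
      calc mergeCancel u (y :: vt) = mergeCancel u.dropLast vt := by simp [mergeCancel, hl]
        _ = List.foldr stepR vt u.dropLast := ih u.dropLast hdrop hvt
        _ = List.foldr stepR (y :: vt) u := by
              conv_rhs => rw [hu', List.foldr_append]
              simp [stepR]
    · have hall : Red (u ++ y :: vt) := by
        refine List.IsChain.append hu hv ?_
        intro a ha b hb hab
        have hby : b = y := by simpa [eq_comm] using hb
        rw [Option.mem_def] at ha
        exact hl (hby ▸ hab ▸ ha)
      calc mergeCancel u (y :: vt) = u ++ y :: vt := by simp [mergeCancel, hl]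
        _ = List.foldr stepR (y :: vt) u := (foldr_stepR_red u (y :: vt) hall).symm

theorem reduceHalve_eq_reduceR : ∀ (l : List Int), reduceHalve l = reduceR l := by
  intro l
  induction l using reduceHalve.induct with
  | case1 => simp [reduceHalve, reduceR]
  | case2 x => simp [reduceHalve, reduceR, stepR]
  | case3 a b t l m ih1 ih2 =>
    rw [reduceHalve]
    rw [ih1, ih2]
    rw [mergeCancel_eq_foldr _ _ (red_reduceR _) (red_reduceR _)]
    rw [← foldr_stepR_reduceR _ _ (red_reduceR _)]
    show List.foldr stepR (List.foldr stepR [] _) _ = _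
    rw [← List.foldr_append]
    rw [List.take_append_drop]
    rfl

theorem foldl_stepA_eq (l s : List Int) : List.foldl solutionStepA s l = List.foldl step s l := by
  induction l generalizing s with
  | nil => rfl
  | cons x t ih => simp [List.foldl, stepA_eq, ih]

-- ===== VERDICT (by name: the statement is the Claim_ definition above) =====
theorem solution_spec : Claim_equal_solution := by
  intro arr _
  unfold Spec_solution solution solution_alt
  have h1 : List.foldl solutionStepA [] arr = reduceHalve arr := by
    rw [foldl_stepA_eq, foldl_step_reduceR arr [] List.isChain_nil,
        foldl_step_red (reduceR arr) [] (by simpa using red_reduceR arr),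
        reduceHalve_eq_reduceR]
    simp
  rw [h1]
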